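-- pv_equiv track=rewrite | github.com/ElonDusk26/ADVENT-OF-CODE | 20th/20th_pt2.py | slowSwapByOffset
-- ===== SOURCE A (Python) =====
-- def slowSwapByOffset(list, fromIndex, offset):
--     direction = 1 if offset > 0 else -1
--     offset %= ((len(list)-1) * direction) #was before: (len(list) * direction) -1
--                                           #which is incorrect, and causes errors,
--                                           #when the offset is equal (len(list) -1)*2
--                                           #dosent cause errors if either 9998 og -9998 is present in the list
--                                           #which is the case for the "data2" list
--
--     currentIndex = fromIndex
--     while offset != 0:
--         nextIndex = currentIndex + direction
--         if nextIndex == len(list):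
--             nextIndex = 0
--
--         buffer = list[nextIndex]
--         list[nextIndex] = list[currentIndex]
--         list[currentIndex] = buffer
--         currentIndex = nextIndex
--         offset -= direction
--     return list
-- ===== SOURCE B (Python) =====
-- # B: instead of A's adjacent-swap loop, compute the cyclic path of visited slots
-- # and write the snapshot back rotated by one (single pass over the path).
-- # Like A, mutates the given list in place and returns it.
-- def slowSwapByOffset(list, fromIndex, offset):
--     direction = 1 if offset > 0 else -1
--     offset %= ((len(list) - 1) * direction)
--     if offset == 0:
--         return list
--     n = len(list)
--     steps = abs(offset)
--     path = [(fromIndex + i * direction) % n for i in range(steps + 1)]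
--     values = [list[p] for p in path]
--     for i in range(steps):
--         list[path[i]] = values[i + 1]
--     list[path[steps]] = values[0]
--     return list
-- ===== Notes on version B (the rewrite author's own statement) =====
-- stated objective: alternative
-- what changed: A walks the offset with repeated adjacent swaps; B computes the cyclic path of visited slots once, snapshots the values on it and writes them back rotated by one.
import Mathlib
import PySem

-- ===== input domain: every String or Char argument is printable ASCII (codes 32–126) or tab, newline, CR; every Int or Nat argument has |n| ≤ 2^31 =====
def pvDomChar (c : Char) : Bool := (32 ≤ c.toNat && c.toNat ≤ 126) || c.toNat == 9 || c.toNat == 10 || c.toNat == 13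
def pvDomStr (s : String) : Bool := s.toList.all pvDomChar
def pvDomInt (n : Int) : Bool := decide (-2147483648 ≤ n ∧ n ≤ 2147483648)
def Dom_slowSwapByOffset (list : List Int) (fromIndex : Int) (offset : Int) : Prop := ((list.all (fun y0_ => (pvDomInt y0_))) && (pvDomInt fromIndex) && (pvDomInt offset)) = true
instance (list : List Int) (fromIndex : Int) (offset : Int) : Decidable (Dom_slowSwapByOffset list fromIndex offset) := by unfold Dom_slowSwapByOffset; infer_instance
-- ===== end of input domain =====

-- B replaces A's adjacent-swap while-loop by computing the cyclic path of visited
-- slots once and writing the snapshot back rotated by one (objective: alternative,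
-- same asymptotic cost).  Both Pythons mutate `list` in place and return it; the
-- equivalence proved here is about the return value.

-- ===== PORT A =====
-- the while-loop of A; the fuel is |offset| after the `%=` preamble, which is
-- exactly the number of iterations (offset moves toward 0 by `direction` each turn)
def slowSwapByOffsetLoop : List Int → Int → Int → Nat → List Int
  | l, _, _, 0 => l
  | l, c, d, fuel+1 =>
    let next0 := c + d
    let next : Int := if next0 = (l.length : Int) then 0 else next0
    match PySem.List.pyGet? l next, PySem.List.pyGet? l c with
    | some buffer, some vcur =>
        -- buffer = list[next]; list[next] = list[cur]; list[cur] = buffer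
        slowSwapByOffsetLoop (PySem.List.pySetD (PySem.List.pySetD l next vcur) c buffer) next d fuel
    | _, _ => l   -- IndexError (excluded by Pre_)

def slowSwapByOffset (list : List Int) (fromIndex : Int) (offset : Int) : List Int :=
  let direction : Int := if 0 < offset then 1 else -1
  match PySem.Int.mod? offset (((list.length : Int) - 1) * direction) with
  | none => list   -- ZeroDivisionError (excluded by Pre_)
  | some off => slowSwapByOffsetLoop list fromIndex direction off.natAbs

-- ===== PORT B =====
def slowSwapByOffset_alt (list : List Int) (fromIndex : Int) (offset : Int) : List Int :=
  let direction : Int := if 0 < offset then 1 else -1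
  match PySem.Int.mod? offset (((list.length : Int) - 1) * direction) with
  | none => list   -- ZeroDivisionError (excluded by Pre_)
  | some off =>
    if off = 0 then list
    else
      let n : Int := (list.length : Int)
      let steps : Nat := off.natAbs
      let path : List Int := (List.range (steps+1)).map (fun i : Nat => PySem.Int.mod (fromIndex + (i : Int) * direction) n)
      let values : List Int := path.map (fun p => PySem.List.pyGetD list p 0)
      let l1 := (List.range steps).foldl (fun acc i => PySem.List.pySetD acc (path.getD i 0) (values.getD (i+1) 0)) list
      PySem.List.pySetD l1 (path.getD steps 0) (values.getD 0 0)

-- ===== PRECONDITION & SPEC =====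
-- Pre_ excludes exactly the inputs on which A raises: single-element lists
-- (ZeroDivisionError in `offset %= (len(list)-1)*direction`) and, when the reduced
-- offset is nonzero, start indices from which the swap walk reaches an index
-- outside [-len, len) (IndexError).
def Pre_slowSwapByOffset (list : List Int) (fromIndex : Int) (offset : Int) : Prop :=
  (list.length : Int) ≠ 1 ∧
  (let d : Int := if 0 < offset then 1 else -1
   let k : Int := PySem.Int.mod offset (((list.length : Int) - 1) * d)
   k = 0 ∨ (-(list.length : Int) ≤ fromIndex ∧ fromIndex < (list.length : Int) ∧
            (d = 1 ∨ -(list.length : Int) ≤ fromIndex + k)))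
instance (list : List Int) (fromIndex : Int) (offset : Int) : Decidable (Pre_slowSwapByOffset list fromIndex offset) := by unfold Pre_slowSwapByOffset; infer_instance

def pvWitness_slowSwapByOffset : List Int × Int × Int := ([1, 2, 3, 4], 1, 2)

def Spec_slowSwapByOffset (list : List Int) (fromIndex : Int) (offset : Int) (out : List Int) : Prop := out = slowSwapByOffset_alt list fromIndex offset
instance (list : List Int) (fromIndex : Int) (offset : Int) (out : List Int) : Decidable (Spec_slowSwapByOffset list fromIndex offset out) := by unfold Spec_slowSwapByOffset; infer_instance

-- ===== CLAIM (what is proved, stated in full; the proofs are below) =====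
def Claim_equal_slowSwapByOffset : Prop := ∀ (list : List Int) (fromIndex : Int) (offset : Int), Dom_slowSwapByOffset list fromIndex offset → Pre_slowSwapByOffset list fromIndex offset → Spec_slowSwapByOffset list fromIndex offset (slowSwapByOffset list fromIndex offset)

-- ===== LEMMAS AND PROOFS =====

-- the slot (real position) addressed by Python index i in a list of length n
def pvSlot (n : Nat) (i : Int) : Nat := (i % (n : Int)).toNat

-- one iteration of A's loop body, on slots: buffer = l[nxt]; l[nxt] = l[cur]; l[cur] = buffer
def pvSwap (l : List Int) (cur nxt : Nat) : List Int :=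
  (l.set nxt (l.getD cur 0)).set cur (l.getD nxt 0)

-- A's loop on slots
def pvCyc (n : Nat) (d : Int) : List Int → Nat → Nat → List Int
  | l, _, 0 => l
  | l, c, t+1 => pvCyc n d (pvSwap l c (pvSlot n ((c : Int) + d))) (pvSlot n ((c : Int) + d)) t

theorem pvSlot_lt (n : Nat) (i : Int) (hn : 0 < n) : pvSlot n i < n := by
  unfold pvSlot
  have h1 : (0:Int) < (n:Int) := by exact_mod_cast hn
  have h2 := Int.emod_lt_of_pos i h1
  have h3 := Int.emod_nonneg i (ne_of_gt h1)
  omega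

theorem pvSlot_congr {n : Nat} {x y : Int} (h : x % (n:Int) = y % (n:Int)) : pvSlot n x = pvSlot n y := by
  unfold pvSlot; rw [h]

theorem pvSlot_add (n : Nat) (x y : Int) (hn : 0 < n) :
    pvSlot n ((pvSlot n x : Int) + y) = pvSlot n (x + y) := by
  have h1 : (0:Int) < (n:Int) := by exact_mod_cast hn
  have h2 := Int.emod_nonneg x (ne_of_gt h1)
  have hx : ((pvSlot n x : Int)) = x % (n:Int) := by unfold pvSlot; omega
  apply pvSlot_congr
  rw [hx]
  exact Int.ModEq.add_right y (Int.emod_emod_of_dvd x dvd_rfl)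

theorem pvSlot_inj {n : Nat} {b d : Int} (hd : d = 1 ∨ d = -1) {i j : Nat}
    (hi : i < n) (hj : j < n)
    (h : pvSlot n (b + (i:Int) * d) = pvSlot n (b + (j:Int) * d)) : i = j := by
  have hn : 0 < n := by omega
  have h1 : (0:Int) < (n:Int) := by exact_mod_cast hn
  have h2 := Int.emod_nonneg (b + (i:Int)*d) (ne_of_gt h1)
  have h3 := Int.emod_nonneg (b + (j:Int)*d) (ne_of_gt h1)
  have hmod : (b + (i:Int) * d) % (n:Int) = (b + (j:Int) * d) % (n:Int) := by
    unfold pvSlot at h; omega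
  have hsub : ((b + (i:Int)*d) - (b + (j:Int)*d)) % (n:Int) = 0 := by
    rw [Int.sub_emod, hmod]; simp
  have hdvd : (n:Int) ∣ ((i:Int) - (j:Int)) * d := by
    have h4 : (b + (i:Int)*d) - (b + (j:Int)*d) = ((i:Int) - (j:Int)) * d := by ring
    rw [h4] at hsub; exact Int.dvd_of_emod_eq_zero hsub
  have hdvd2 : (n:Int) ∣ ((i:Int) - (j:Int)) := by
    rcases hd with h5 | h5 <;> rw [h5] at hdvd
    · simpa using hdvd
    · rw [mul_neg_one] at hdvd; exact (dvd_neg).1 hdvd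
  by_contra hne
  have hpos : (0:Int) < |(i:Int) - (j:Int)| := by
    rw [abs_pos]; omega
  have hle := Int.le_of_dvd hpos ((dvd_abs _ _).mpr hdvd2)
  have hlt : |(i:Int) - (j:Int)| < (n:Int) := by
    rw [abs_lt]; constructor <;> omega
  exact lt_irrefl _ (lt_of_le_of_lt hle hlt)

-- swap access lemmas
theorem pvSwap_length (l : List Int) (a b : Nat) : (pvSwap l a b).length = l.length := by
  simp [pvSwap]

theorem pvSwap_get_cur (l : List Int) (a b : Nat) (ha : a < l.length) (hb : b < l.length) :
    (pvSwap l a b)[a]? = l[b]? := by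
  simp [pvSwap, List.getElem?_set, ha, hb, List.getD_eq_getElem _ _ hb, List.getElem?_eq_getElem]

theorem pvSwap_get_nxt (l : List Int) (a b : Nat) (ha : a < l.length) (hb : b < l.length)
    (hne : a ≠ b) : (pvSwap l a b)[b]? = l[a]? := by
  simp [pvSwap, List.getElem?_set, hne, Ne.symm hne, ha, hb,
        List.getD_eq_getElem _ _ ha, List.getElem?_eq_getElem]

theorem pvSwap_get_other (l : List Int) (a b j : Nat) (h1 : j ≠ a) (h2 : j ≠ b) :
    (pvSwap l a b)[j]? = l[j]? := by
  simp [pvSwap, List.getElem?_set, Ne.symm h1, Ne.symm h2]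

theorem pvCyc_length (n : Nat) (d : Int) (l : List Int) (c t : Nat) :
    (pvCyc n d l c t).length = l.length := by
  induction t generalizing l c with
  | zero => rfl
  | succ t ih => simp [pvCyc, ih, pvSwap_length]

-- indexing bridges between Python indices and slots
theorem pyGet?_slot (l : List Int) (i : Int) (h1 : -(l.length:Int) ≤ i) (h2 : i < (l.length:Int)) :
    PySem.List.pyGet? l i = some (l.getD (pvSlot l.length i) 0) := by
  have hn : 0 < l.length := by omega
  have h0 : (0:Int) < (l.length:Int) := by exact_mod_cast hn
  by_cases hi : 0 ≤ i
  · have hmod : i % (l.length:Int) = i := Int.emod_eq_of_lt hi h2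
    have hs : pvSlot l.length i = i.toNat := by unfold pvSlot; rw [hmod]
    have hlt : i.toNat < l.length := by omega
    simp [PySem.List.pyGet?, PySem.List.pyIdx?, hi, h2, hs,
          List.getElem?_eq_getElem hlt, List.getD_eq_getElem _ _ hlt]
  · have hadd : (i + (l.length:Int)) % (l.length:Int) = i % (l.length:Int) := by
      have := Int.add_mul_emod_self_left (a := i) (b := (l.length:Int)) (c := 1)
      simpa using this
    have hmod : i % (l.length:Int) = i + (l.length:Int) := by
      rw [← hadd]; exact Int.emod_eq_of_lt (by omega) (by omega)
    have hs : pvSlot l.length i = l.length - (-i).toNat := by unfold pvSlot; omega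
    have hlt : l.length - (-i).toNat < l.length := by omega
    simp [PySem.List.pyGet?, PySem.List.pyIdx?, hi, h1, hs,
          List.getElem?_eq_getElem hlt, List.getD_eq_getElem _ _ hlt]

theorem pySetD_slot (l : List Int) (i : Int) (v : Int) (h1 : -(l.length:Int) ≤ i) (h2 : i < (l.length:Int)) :
    PySem.List.pySetD l i v = l.set (pvSlot l.length i) v := by
  have hn : 0 < l.length := by omega
  by_cases hi : 0 ≤ i
  · have hmod : i % (l.length:Int) = i := Int.emod_eq_of_lt hi h2
    have hs : pvSlot l.length i = i.toNat := by unfold pvSlot; rw [hmod]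
    simp [PySem.List.pySetD, PySem.List.pySet?, PySem.List.pyIdx?, hi, h2, hs]
  · have hadd : (i + (l.length:Int)) % (l.length:Int) = i % (l.length:Int) := by
      have := Int.add_mul_emod_self_left (a := i) (b := (l.length:Int)) (c := 1)
      simpa using this
    have hmod : i % (l.length:Int) = i + (l.length:Int) := by
      rw [← hadd]; exact Int.emod_eq_of_lt (by omega) (by omega)
    have hs : pvSlot l.length i = l.length - (-i).toNat := by unfold pvSlot; omega
    simp [PySem.List.pySetD, PySem.List.pySet?, PySem.List.pyIdx?, hi, h1, hs]

-- characterization of pvCyc: the visited slots are cyclically rotated by one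
theorem pvCyc_spec (n : Nat) (d : Int) (hd : d = 1 ∨ d = -1) :
    ∀ (t : Nat) (l : List Int) (b : Int), t < n → l.length = n →
      (∀ i, i < t → (pvCyc n d l (pvSlot n b) t)[pvSlot n (b + (i:Int) * d)]? = l[pvSlot n (b + ((i:Int)+1) * d)]?) ∧
      ((pvCyc n d l (pvSlot n b) t)[pvSlot n (b + (t:Int) * d)]? = l[pvSlot n b]?) ∧
      (∀ j, (∀ i, i ≤ t → j ≠ pvSlot n (b + (i:Int) * d)) → (pvCyc n d l (pvSlot n b) t)[j]? = l[j]?) := by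
  intro t
  induction t with
  | zero =>
    intro l b ht hl
    refine ⟨fun i hi => absurd hi (by omega), ?_, fun j hj => rfl⟩
    norm_num [pvCyc]
  | succ t ih =>
    intro l b ht hl
    have hn : 0 < n := by omega
    have hc' : pvSlot n ((pvSlot n b : Int) + d) = pvSlot n (b + d) := pvSlot_add n b d hn
    have hP : ∀ x : Int, pvSlot n (b + d + x * d) = pvSlot n (b + (x + 1) * d) := by
      intro x; congr 1; ring
    have hPlt : ∀ x : Int, pvSlot n x < n := fun x => pvSlot_lt n x hn
    have hinj : ∀ (i j : Nat), i ≤ t + 1 → j ≤ t + 1 →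
        pvSlot n (b + (i:Int) * d) = pvSlot n (b + (j:Int) * d) → i = j := by
      intro i j hi hj h
      exact pvSlot_inj hd (by omega) (by omega) h
    set l' := pvSwap l (pvSlot n b) (pvSlot n (b + d)) with hl'def
    have hlen' : l'.length = n := by rw [hl'def, pvSwap_length, hl]
    have hstep : pvCyc n d l (pvSlot n b) (t+1) = pvCyc n d l' (pvSlot n (b + d)) t := by
      rw [pvCyc, hc', hl'def]
    obtain ⟨ihb, ihc, ihd⟩ := ih l' (b + d) (by omega) hlen'
    refine ⟨?_, ?_, ?_⟩
    · intro i hi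
      match i with
      | 0 =>
        have h0 : pvSlot n (b + ((0:Nat):Int) * d) = pvSlot n b := by norm_num
        have h1 : pvSlot n (b + (((0:Nat):Int) + 1) * d) = pvSlot n (b + d) := by norm_num
        rw [hstep, h0, h1]
        have hmiss : ∀ i, i ≤ t → pvSlot n b ≠ pvSlot n (b + d + (i:Int) * d) := by
          intro i hit heq
          rw [hP] at heq
          have : (i:Int) + 1 = ((i+1 : Nat) : Int) := by push_cast; ring
          rw [this] at heq
          have := hinj 0 (i+1) (by omega) (by omega) (by simpa using heq)
          omega
        rw [ihd _ hmiss, hl'def,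
            pvSwap_get_cur l _ _ (by rw [hl]; exact hPlt b) (by rw [hl]; exact hPlt _)]
      | (i'+1) =>
        have hb := ihb i' (by omega)
        rw [hP, hP] at hb
        have e1 : ((i':Int) + 1) = (((i'+1 : Nat)):Int) := by push_cast; ring
        rw [e1] at hb
        rw [hstep, hb, hl'def]
        apply pvSwap_get_other
        · intro heq
          have h0 : pvSlot n (b + ((0:Nat):Int) * d) = pvSlot n b := by norm_num
          have e3 : (((i'+1:Nat)):Int) + 1 = (((i'+2 : Nat)):Int) := by push_cast; ring
          rw [e3] at heq
          have := hinj (i'+2) 0 (by omega) (by omega) (by rw [heq, ← h0])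
          omega
        · intro heq
          have h1 : pvSlot n (b + ((1:Nat):Int) * d) = pvSlot n (b + d) := by norm_num
          have e3 : (((i'+1:Nat)):Int) + 1 = (((i'+2 : Nat)):Int) := by push_cast; ring
          rw [e3] at heq
          have := hinj (i'+2) 1 (by omega) (by omega) (by rw [heq, ← h1])
          omega
    · have hc := ihc
      rw [hP] at hc
      have e1 : ((t:Int) + 1) = (((t+1 : Nat)):Int) := by push_cast; ring
      rw [e1] at hc
      rw [hstep, hc, hl'def]
      have hne : pvSlot n b ≠ pvSlot n (b + d) := by
        intro heq
        have h0 : pvSlot n (b + ((0:Nat):Int) * d) = pvSlot n b := by norm_num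
        have h1 : pvSlot n (b + ((1:Nat):Int) * d) = pvSlot n (b + d) := by norm_num
        have := hinj 0 1 (by omega) (by omega) (by rw [h0, h1, heq])
        omega
      rw [pvSwap_get_nxt l _ _ (by rw [hl]; exact hPlt _) (by rw [hl]; exact hPlt _) hne]
    · intro j hj
      have hmiss : ∀ i, i ≤ t → j ≠ pvSlot n (b + d + (i:Int) * d) := by
        intro i hit
        rw [hP]
        have e1 : ((i:Int) + 1) = (((i+1 : Nat)):Int) := by push_cast; ring
        rw [e1]
        exact hj (i+1) (by omega)
      rw [hstep, ihd _ hmiss, hl'def]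
      apply pvSwap_get_other
      · have h0 : pvSlot n (b + ((0:Nat):Int) * d) = pvSlot n b := by norm_num
        rw [← h0]; exact hj 0 (by omega)
      · have h1 : pvSlot n (b + ((1:Nat):Int) * d) = pvSlot n (b + d) := by norm_num
        rw [← h1]; exact hj 1 (by omega)

-- A's loop equals pvCyc under Pre_'s bounds
theorem loop_eq_pvCyc (n : Nat) (d : Int) (hd : d = 1 ∨ d = -1) (hn : 3 ≤ n) :
    ∀ (fuel : Nat) (l : List Int) (c : Int), l.length = n →
      -(n:Int) ≤ c → c < (n:Int) → (d = -1 → -(n:Int) ≤ c - fuel) →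
      slowSwapByOffsetLoop l c d fuel = pvCyc n d l (pvSlot n c) fuel := by
  intro fuel
  induction fuel with
  | zero => intro l c _ _ _ _; rfl
  | succ fuel ih =>
    intro l c hl hc1 hc2 hdown
    have hn0 : 0 < n := by omega
    have hnext : ∃ nx : Int, (if c + d = (l.length:Int) then (0:Int) else c + d) = nx ∧
        -(n:Int) ≤ nx ∧ nx < (n:Int) ∧ pvSlot n nx = pvSlot n (c + d) ∧
        (d = -1 → nx = c - 1) := by
      by_cases he : c + d = (l.length:Int)
      · refine ⟨0, by rw [if_pos he], by omega, by omega, ?_, ?_⟩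
        · apply pvSlot_congr
          rw [hl] at he
          rw [he]
          simp [Int.emod_self]
        · intro hdm1
          rw [hdm1] at he
          rw [hl] at he
          omega
      · refine ⟨c + d, by rw [if_neg he], ?_, ?_, rfl, ?_⟩
        · rcases hd with h | h <;> rw [h] <;> [omega; (have := hdown h; omega)]
        · rcases hd with h | h <;> rw [h] <;> rw [hl] at he <;> omega
        · intro h; omega
    obtain ⟨nx, hnx_eq, hnx1, hnx2, hnx_slot, hnx_m1⟩ := hnext
    have hget_nx := pyGet?_slot l nx (by omega) (by omega)
    have hget_c := pyGet?_slot l c (by omega) (by omega)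
    have hset1 := pySetD_slot l nx (l.getD (pvSlot l.length c) 0) (by omega) (by omega)
    rw [hl] at hget_nx hget_c hset1
    have hlen1 : (l.set (pvSlot n nx) (l.getD (pvSlot n c) 0)).length = l.length := by simp
    have hset2 := pySetD_slot (l.set (pvSlot n nx) (l.getD (pvSlot n c) 0)) c
        (l.getD (pvSlot n nx) 0) (by rw [hlen1]; omega) (by rw [hlen1]; omega)
    rw [hlen1, hl] at hset2
    show (let next0 := c + d
          let next : Int := if next0 = (l.length : Int) then 0 else next0
          match PySem.List.pyGet? l next, PySem.List.pyGet? l c with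
          | some buffer, some vcur =>
              slowSwapByOffsetLoop (PySem.List.pySetD (PySem.List.pySetD l next vcur) c buffer) next d fuel
          | _, _ => l) = _
    simp only []
    rw [hnx_eq, hget_nx, hget_c]
    simp only []
    rw [hset1, hset2]
    have hrec := ih ((l.set (pvSlot n nx) (l.getD (pvSlot n c) 0)).set (pvSlot n c) (l.getD (pvSlot n nx) 0))
        nx (by simp [hl]) hnx1 hnx2
        (by intro h; have := hdown h; have := hnx_m1 h; omega)
    rw [hrec]
    conv_rhs => rw [pvCyc]
    rw [pvSlot_add n c d hn0, ← hnx_slot]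
    rfl

-- B's write-back loop in abstract form: positions P 0 .. P (m-1) receive the
-- snapshot values at P 1 .. P m
def pvW (l : List Int) (P : Nat → Nat) (m : Nat) : List Int :=
  (List.range m).foldl (fun acc i => acc.set (P i) (l.getD (P (i+1)) 0)) l

theorem pvW_succ (l : List Int) (P : Nat → Nat) (m : Nat) :
    pvW l P (m+1) = (pvW l P m).set (P m) (l.getD (P (m+1)) 0) := by
  unfold pvW; rw [List.range_succ, List.foldl_append]; rfl

theorem pvW_length (l : List Int) (P : Nat → Nat) (m : Nat) : (pvW l P m).length = l.length := by
  induction m with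
  | zero => rfl
  | succ m ih => rw [pvW_succ]; simp [ih]

theorem pvW_get_hit (l : List Int) (P : Nat → Nat) (m : Nat)
    (hinj : ∀ i j, i ≤ m → j ≤ m → P i = P j → i = j)
    (hPlt : ∀ i, P i < l.length) :
    ∀ i, i < m → (pvW l P m)[P i]? = some (l.getD (P (i+1)) 0) := by
  induction m with
  | zero => intro i hi; omega
  | succ m ih =>
    intro i hi
    rw [pvW_succ]
    by_cases him : i = m
    · subst him
      rw [List.getElem?_set_self (by rw [pvW_length]; exact hPlt i)]
    · rw [List.getElem?_set_ne (fun h => him (hinj m i (by omega) (by omega) h).symm)]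
      exact ih (fun i j hi hj h => hinj i j (by omega) (by omega) h) i (by omega)

theorem pvW_get_miss (l : List Int) (P : Nat → Nat) (m : Nat) :
    ∀ j, (∀ i, i < m → j ≠ P i) → (pvW l P m)[j]? = l[j]? := by
  induction m with
  | zero => intro j _; rfl
  | succ m ih =>
    intro j hj
    rw [pvW_succ, List.getElem?_set_ne (fun h => hj m (by omega) h.symm)]
    exact ih j (fun i hi => hj i (by omega))

-- PySem.Int.mod is Euclidean emod for a positive modulus
theorem pvFmod_pos (x : Int) (n : Nat) (hn : 0 < n) : PySem.Int.mod x (n:Int) = x % (n:Int) := by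
  show x.fmod (n:Int) = x % (n:Int)
  rw [Int.fmod_eq_emod]
  have : (0:Int) ≤ (n:Int) := by positivity
  simp [this]

theorem pvGetElem?_eq_some_getD (l : List Int) (x : Nat) (h : x < l.length) :
    l[x]? = some (l.getD x 0) := by
  rw [List.getElem?_eq_getElem h, List.getD_eq_getElem _ _ h]

-- B's port, reduced to pvW + one final set, for nonzero reduced offset
theorem alt_eq_pvW (l : List Int) (f o d k : Int)
    (ho : (if (0:Int) < o then (1:Int) else -1) = d)
    (hmod : PySem.Int.mod? o (((l.length:Int) - 1) * d) = some k)
    (hk0 : k ≠ 0) (hn : 3 ≤ l.length) (hkd : k.natAbs ≤ l.length - 2) :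
    slowSwapByOffset_alt l f o =
      (pvW l (fun i => pvSlot l.length (f + (i:Int) * d)) k.natAbs).set
        (pvSlot l.length (f + ((k.natAbs : Nat) : Int) * d)) (l.getD (pvSlot l.length f) 0) := by
  have hn0 : 0 < l.length := by omega
  have hnz : (0:Int) < (l.length:Int) := by exact_mod_cast hn0
  have hpath : ∀ i, i ≤ k.natAbs →
      ((List.range (k.natAbs+1)).map (fun i : Nat => PySem.Int.mod (f + (i : Int) * d) ((l.length:Int)))).getD i 0
        = (f + (i:Int) * d) % ((l.length:Int)) := by
    intro i hi
    have hlt : i < ((List.range (k.natAbs+1)).map (fun i : Nat => PySem.Int.mod (f + (i : Int) * d) ((l.length:Int)))).length := by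
      simp; omega
    rw [List.getD_eq_getElem _ _ hlt, List.getElem_map, List.getElem_range, pvFmod_pos _ _ hn0]
  have hmodb : ∀ i : Nat, 0 ≤ (f + (i:Int) * d) % ((l.length:Int)) ∧ (f + (i:Int) * d) % ((l.length:Int)) < ((l.length:Int)) := by
    intro i
    exact ⟨Int.emod_nonneg _ (by omega), Int.emod_lt_of_pos _ hnz⟩
  have hslotmod : ∀ i : Nat, pvSlot l.length ((f + (i:Int) * d) % ((l.length:Int))) = pvSlot l.length (f + (i:Int) * d) := by
    intro i
    apply pvSlot_congr
    exact Int.emod_emod_of_dvd _ dvd_rfl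
  have hvals : ∀ i, i ≤ k.natAbs →
      (((List.range (k.natAbs+1)).map (fun i : Nat => PySem.Int.mod (f + (i : Int) * d) ((l.length:Int)))).map
          (fun p => PySem.List.pyGetD l p 0)).getD i 0 = l.getD (pvSlot l.length (f + (i:Int) * d)) 0 := by
    intro i hi
    have hlt : i < (((List.range (k.natAbs+1)).map (fun i : Nat => PySem.Int.mod (f + (i : Int) * d) ((l.length:Int)))).map
          (fun p => PySem.List.pyGetD l p 0)).length := by simp; omega
    rw [List.getD_eq_getElem _ _ hlt, List.getElem_map]
    have hlt2 : i < ((List.range (k.natAbs+1)).map (fun i : Nat => PySem.Int.mod (f + (i : Int) * d) ((l.length:Int)))).length := by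
      simp; omega
    have hp := hpath i hi
    rw [List.getD_eq_getElem _ _ hlt2] at hp
    rw [hp]
    unfold PySem.List.pyGetD
    rw [pyGet?_slot l _ (by have := hmodb i; omega) (by have := hmodb i; omega)]
    rw [hslotmod i]
    rfl
  have hfold : ∀ m, m ≤ k.natAbs →
      (List.range m).foldl (fun acc i =>
          PySem.List.pySetD acc
            (((List.range (k.natAbs+1)).map (fun i : Nat => PySem.Int.mod (f + (i : Int) * d) ((l.length:Int)))).getD i 0)
            ((((List.range (k.natAbs+1)).map (fun i : Nat => PySem.Int.mod (f + (i : Int) * d) ((l.length:Int)))).map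
                (fun p => PySem.List.pyGetD l p 0)).getD (i+1) 0)) l
        = pvW l (fun i => pvSlot l.length (f + (i:Int) * d)) m := by
    intro m hm
    induction m with
    | zero => rfl
    | succ m ihm =>
      rw [show List.range (m+1) = List.range m ++ [m] from List.range_succ,
          List.foldl_append, ihm (by omega), List.foldl_cons, List.foldl_nil,
          hpath m (by omega), hvals (m+1) (by omega)]
      have hlen : (pvW l (fun i => pvSlot l.length (f + (i:Int) * d)) m).length = l.length :=
        pvW_length l _ m
      rw [pySetD_slot _ _ _ (by rw [hlen]; have := hmodb m; omega) (by rw [hlen]; have := hmodb m; omega)]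
      rw [hlen, hslotmod m, pvW_succ]
  simp only [slowSwapByOffset_alt, ho, hmod]
  rw [if_neg hk0]
  rw [hfold k.natAbs (le_refl _), hpath k.natAbs (le_refl _), hvals 0 (by omega)]
  have hlen : (pvW l (fun i => pvSlot l.length (f + (i:Int) * d)) k.natAbs).length = l.length :=
    pvW_length l _ k.natAbs
  rw [pySetD_slot _ _ _ (by rw [hlen]; have := hmodb k.natAbs; omega) (by rw [hlen]; have := hmodb k.natAbs; omega)]
  rw [hlen, hslotmod k.natAbs]
  norm_num

-- A's port, reduced to its loop, for a defined modulus
theorem a_eq_loop (l : List Int) (f o d k : Int)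
    (ho : (if (0:Int) < o then (1:Int) else -1) = d)
    (hmod : PySem.Int.mod? o (((l.length:Int) - 1) * d) = some k) :
    slowSwapByOffset l f o = slowSwapByOffsetLoop l f d k.natAbs := by
  simp only [slowSwapByOffset, ho, hmod]

-- B returns the list unchanged when the reduced offset is zero
theorem alt_of_zero (l : List Int) (f o d : Int)
    (ho : (if (0:Int) < o then (1:Int) else -1) = d)
    (hmod : PySem.Int.mod? o (((l.length:Int) - 1) * d) = some 0) :
    slowSwapByOffset_alt l f o = l := by
  simp only [slowSwapByOffset_alt, ho, hmod]
  simp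

-- ===== VERDICT (by name: the statement is the Claim_ definition above) =====
theorem slowSwapByOffset_spec : Claim_equal_slowSwapByOffset := by
  unfold Claim_equal_slowSwapByOffset
  intro l f o _ hpre
  unfold Spec_slowSwapByOffset
  obtain ⟨hn1, hrest⟩ := hpre
  set d : Int := if (0:Int) < o then 1 else -1 with hddef
  have hd : d = 1 ∨ d = -1 := by
    rw [hddef]; split <;> simp
  have hm0 : ((l.length:Int) - 1) * d ≠ 0 := by
    intro h
    rcases mul_eq_zero.mp h with h | h
    · exact hn1 (by omega)
    · rcases hd with h' | h' <;> rw [h'] at h <;> norm_num at h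
  set k : Int := PySem.Int.mod o (((l.length:Int) - 1) * d) with hkdef
  have hmod : PySem.Int.mod? o (((l.length:Int) - 1) * d) = some k := by
    rw [hkdef]
    simp [PySem.Int.mod?, PySem.Int.mod, hm0]
  have ha := a_eq_loop l f o d k hddef.symm hmod
  by_cases hk0 : k = 0
  · rw [ha, hk0, alt_of_zero l f o d hddef.symm (hk0 ▸ hmod)]
    rfl
  · -- basic bounds: the list has at least 3 elements and |k| ≤ len - 2
    have hkb : 3 ≤ l.length ∧ k.natAbs ≤ l.length - 2 ∧ (d = 1 → 0 ≤ k) ∧ (d = -1 → k ≤ 0) := by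
      rcases hd with h' | h' <;> rw [h'] at hkdef
      · rw [mul_one] at hkdef
        by_cases hpos : (0:Int) < (l.length:Int) - 1
        · have h1 := PySem.Int.mod_nonneg o hpos
          have h2 := PySem.Int.mod_lt o hpos
          rw [← hkdef] at h1 h2
          have hlen3 : 3 ≤ l.length := by
            by_contra hlt
            have he1 : (l.length:Int) - 1 = 1 := by omega
            rw [he1] at h2
            exact hk0 (by omega)
          refine ⟨hlen3, by omega, fun _ => h1, ?_⟩
          rw [h']; intro hcon; norm_num at hcon
        · have hneg : (l.length:Int) - 1 < 0 := by
            have : (l.length:Int) - 1 ≠ 0 := fun h => hn1 (by omega)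
            omega
          have h2 := PySem.Int.mod_neg_bounds o hneg
          rw [← hkdef] at h2
          exact absurd (by omega : k = 0) hk0
      · rw [mul_neg_one] at hkdef
        by_cases hneg : -((l.length:Int) - 1) < 0
        · have h2 := PySem.Int.mod_neg_bounds o hneg
          rw [← hkdef] at h2
          have hlen3 : 3 ≤ l.length := by
            by_contra hlt
            have he1 : -((l.length:Int) - 1) = -1 := by omega
            rw [he1] at h2
            exact hk0 (by omega)
          refine ⟨hlen3, by omega, ?_, fun _ => h2.2⟩
          rw [h']; intro hcon; norm_num at hcon
        · have hpos : (0:Int) < -((l.length:Int) - 1) := by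
            have : (l.length:Int) - 1 ≠ 0 := fun h => hn1 (by omega)
            omega
          have h1 := PySem.Int.mod_nonneg o hpos
          have h2 := PySem.Int.mod_lt o hpos
          rw [← hkdef] at h1 h2
          have he1 : -((l.length:Int) - 1) = 1 := by omega
          rw [he1] at h2
          exact absurd (by omega : k = 0) hk0
    obtain ⟨hn3, hkd, hsgn1, hsgnm1⟩ := hkb
    have hn0 : 0 < l.length := by omega
    have hnz : (0:Int) < (l.length:Int) := by exact_mod_cast hn0
    have hstepsInt : (k.natAbs : Int) = k * d := by
      rcases hd with h' | h' <;> rw [h']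
      · have := hsgn1 h'; omega
      · have := hsgnm1 h'; omega
    -- Pre_'s bounds on fromIndex
    have hfb : -(l.length:Int) ≤ f ∧ f < (l.length:Int) ∧ (d = -1 → -(l.length:Int) ≤ f - (k.natAbs:Int)) := by
      rcases hrest with h | ⟨h1, h2, h3⟩
      · exact absurd h hk0
      · refine ⟨h1, h2, ?_⟩
        intro h'
        rcases h3 with h3 | h3
        · rw [h3] at h'; norm_num at h'
        · rw [h'] at hstepsInt; omega
    have hPlt : ∀ x : Int, pvSlot l.length x < l.length := fun x => pvSlot_lt l.length x hn0
    have hinj : ∀ i j : Nat, i ≤ k.natAbs → j ≤ k.natAbs →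
        pvSlot l.length (f + (i:Int) * d) = pvSlot l.length (f + (j:Int) * d) → i = j := by
      intro i j hi hj h
      exact pvSlot_inj hd (by omega) (by omega) h
    -- A's side
    have hA : slowSwapByOffset l f o = pvCyc l.length d l (pvSlot l.length f) k.natAbs := by
      rw [ha]
      exact loop_eq_pvCyc l.length d hd hn3 k.natAbs l f rfl hfb.1 hfb.2.1
        (fun h' => by have := hfb.2.2 h'; omega)
    obtain ⟨hCb, hCc, hCd⟩ := pvCyc_spec l.length d hd k.natAbs l f (by omega) rfl
    -- B's side
    have hB := alt_eq_pvW l f o d k hddef.symm hmod hk0 hn3 hkd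
    rw [hA, hB]
    -- pointwise comparison
    apply List.ext_getElem?
    intro j
    have hlenA : (pvCyc l.length d l (pvSlot l.length f) k.natAbs).length = l.length :=
      pvCyc_length l.length d l _ k.natAbs
    have hlenW : (pvW l (fun i => pvSlot l.length (f + (i:Int) * d)) k.natAbs).length = l.length :=
      pvW_length l _ k.natAbs
    have hP0 : pvSlot l.length (f + ((0:Nat):Int) * d) = pvSlot l.length f := by norm_num
    by_cases hjn : j < l.length
    · by_cases hex : ∃ i, i ≤ k.natAbs ∧ j = pvSlot l.length (f + (i:Int) * d)
      · obtain ⟨i, hi, rfl⟩ := hex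
        by_cases hil : i = k.natAbs
        · subst hil
          rw [hCc, List.getElem?_set_self (by rw [hlenW]; exact hPlt _)]
          exact pvGetElem?_eq_some_getD l _ (hPlt f)
        · have hilt : i < k.natAbs := by omega
          have hcb := hCb i hilt
          have hcast : ((i:Int) + 1) = ((i+1:Nat):Int) := by push_cast; ring
          rw [hcast] at hcb
          rw [hcb, List.getElem?_set_ne (fun h => hil (hinj k.natAbs i (by omega) (by omega) h).symm),
              pvW_get_hit l _ k.natAbs hinj (fun i => hPlt _) i hilt]
          exact pvGetElem?_eq_some_getD l _ (hPlt _)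
      · push_neg at hex
        rw [hCd j (fun i hi h => hex i hi h),
            List.getElem?_set_ne (fun h => hex k.natAbs (le_refl _) h.symm),
            pvW_get_miss l _ k.natAbs j (fun i hi h => hex i (by omega) h)]
    · rw [List.getElem?_eq_none (by omega : (pvCyc l.length d l (pvSlot l.length f) k.natAbs).length ≤ j),
          List.getElem?_eq_none (by simp [hlenW]; omega)]
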